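-- pv_equiv track=rewrite | github.com/RodrigoMisrahi/Ep2-dessfot | funcoes.py | calcula_pontos_sequencia_alta
-- ===== SOURCE A (Python) =====
-- def calcula_pontos_sequencia_alta(faces):
--     faces = sorted(set(faces))
--     for i in range(len(faces) - 4):
--         if (faces[i] + 1 == faces[i+1] and
--             faces[i] + 2 == faces[i+2] and
--             faces[i] + 3 == faces[i+3] and
--             faces[i] + 4 == faces[i+4]):
--             return 30
--     return 0
-- ===== SOURCE B (Python) =====
-- def calcula_pontos_sequencia_alta(faces):
--     s = set(faces)
--     for v in s:
--         if v + 1 in s and v + 2 in s and v + 3 in s and v + 4 in s: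
--             return 30
--     return 0
-- ===== Notes on version B (the rewrite author's own statement) =====
-- stated objective: simpler
-- what changed: B drops the sort entirely: instead of sorting the distinct faces and sliding an index window, it probes the hash set for v+1..v+4 from each distinct value v.
import Mathlib
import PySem

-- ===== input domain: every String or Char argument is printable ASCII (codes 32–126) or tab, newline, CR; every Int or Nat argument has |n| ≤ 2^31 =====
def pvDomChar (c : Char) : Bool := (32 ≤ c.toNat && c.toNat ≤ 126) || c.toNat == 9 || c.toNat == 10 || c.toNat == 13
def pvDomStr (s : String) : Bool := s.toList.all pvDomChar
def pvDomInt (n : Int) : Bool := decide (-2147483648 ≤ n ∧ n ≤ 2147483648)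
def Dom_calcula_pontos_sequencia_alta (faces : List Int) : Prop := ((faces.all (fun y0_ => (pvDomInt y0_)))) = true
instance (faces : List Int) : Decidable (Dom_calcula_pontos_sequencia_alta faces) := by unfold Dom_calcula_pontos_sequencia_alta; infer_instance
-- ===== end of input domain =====

-- B removes the sort: it probes the set of faces for v+1..v+4 from each distinct value v,
-- instead of sorting the distinct faces and sliding an index window (objective: simpler).

-- ===== PORT A =====
-- the 'for i in range(len(faces)-4): if …: return 30' loop, with early return
def pvLoopA (l : List Int) : List Int → Int
  | [] => 0
  | i :: rest =>
    if PySem.List.pyGetD l i 0 + 1 = PySem.List.pyGetD l (i + 1) 0 ∧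
       PySem.List.pyGetD l i 0 + 2 = PySem.List.pyGetD l (i + 2) 0 ∧
       PySem.List.pyGetD l i 0 + 3 = PySem.List.pyGetD l (i + 3) 0 ∧
       PySem.List.pyGetD l i 0 + 4 = PySem.List.pyGetD l (i + 4) 0 then 30
    else pvLoopA l rest

def calcula_pontos_sequencia_alta (faces : List Int) : Int :=
  let faces := PySem.List.sorted (PySem.Set.ofList faces) (fun x => x) false
  pvLoopA faces (PySem.List.pyRange 0 ((faces.length : Int) - 4) 1)

-- ===== PORT B =====
-- the 'for v in s: if v+1 in s and …: return 30' loop, with early return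
def pvLoopB (s : List Int) : List Int → Int
  | [] => 0
  | v :: rest =>
    if s.contains (v + 1) && s.contains (v + 2) && s.contains (v + 3) && s.contains (v + 4) then 30
    else pvLoopB s rest

def calcula_pontos_sequencia_alta_alt (faces : List Int) : Int :=
  let s : PySem.Set Int := PySem.Set.ofList faces
  pvLoopB s s

-- ===== PRECONDITION & SPEC =====
def Spec_calcula_pontos_sequencia_alta (faces : List Int) (out : Int) : Prop := out = calcula_pontos_sequencia_alta_alt faces
instance (faces : List Int) (out : Int) : Decidable (Spec_calcula_pontos_sequencia_alta faces out) := by unfold Spec_calcula_pontos_sequencia_alta; infer_instance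

-- ===== CLAIM (what is proved, stated in full; the proofs are below) =====
def Claim_equal_calcula_pontos_sequencia_alta : Prop := ∀ (faces : List Int), Dom_calcula_pontos_sequencia_alta faces → Spec_calcula_pontos_sequencia_alta faces (calcula_pontos_sequencia_alta faces)

-- ===== LEMMAS AND PROOFS =====

lemma pvLoopA_eq_thirty_iff (l : List Int) (is : List Int) :
    pvLoopA l is = 30 ↔ ∃ i ∈ is,
      PySem.List.pyGetD l i 0 + 1 = PySem.List.pyGetD l (i + 1) 0 ∧
      PySem.List.pyGetD l i 0 + 2 = PySem.List.pyGetD l (i + 2) 0 ∧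
      PySem.List.pyGetD l i 0 + 3 = PySem.List.pyGetD l (i + 3) 0 ∧
      PySem.List.pyGetD l i 0 + 4 = PySem.List.pyGetD l (i + 4) 0 := by
  induction is with
  | nil => simp [pvLoopA]
  | cons i rest ih =>
    simp only [pvLoopA]
    split <;> simp_all

lemma pvLoopA_thirty_or_zero (l : List Int) (is : List Int) :
    pvLoopA l is = 30 ∨ pvLoopA l is = 0 := by
  induction is with
  | nil => right; rfl
  | cons i rest ih => simp only [pvLoopA]; split <;> simp_all

lemma pvLoopB_eq_thirty_iff (s : List Int) (vs : List Int) :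
    pvLoopB s vs = 30 ↔ ∃ v ∈ vs,
      (v + 1) ∈ s ∧ (v + 2) ∈ s ∧ (v + 3) ∈ s ∧ (v + 4) ∈ s := by
  induction vs with
  | nil => simp [pvLoopB]
  | cons v rest ih =>
    simp only [pvLoopB]
    split <;> simp_all

lemma pvLoopB_thirty_or_zero (s : List Int) (vs : List Int) :
    pvLoopB s vs = 30 ∨ pvLoopB s vs = 0 := by
  induction vs with
  | nil => right; rfl
  | cons v rest ih => simp only [pvLoopB]; split <;> simp_all

-- in a strictly increasing Int list, the element a+1 sits immediately after a
lemma idx_succ (l : List Int) (hp : l.Pairwise (· < ·)) (i j : Nat)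
    (hi : i < l.length) (hj : j < l.length) (hij : l[j] = l[i] + 1) : j = i + 1 := by
  have hmono := List.pairwise_iff_getElem.mp hp
  by_contra hne
  rcases lt_trichotomy j i with h | h | h
  · have hlt : l[j] < l[i] := hmono j i hj hi h
    omega
  · subst h; simp at hij
  · have hji : i + 1 < j := by omega
    have h1 : i + 1 < l.length := by omega
    have ha : l[i] < l[i + 1] := hmono i (i + 1) hi h1 (by omega)
    have hb : l[i + 1] < l[j] := hmono (i + 1) j h1 hj hji
    omega

lemma idxeq_int (l : List Int) (m m' : Nat) (hm : m < l.length) (hm' : m' < l.length)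
    (h : m = m') : l[m] = l[m'] := by subst h; rfl

lemma window_iff (faces : List Int) :
    (∃ i ∈ PySem.List.pyRange 0 (((PySem.List.sorted (PySem.Set.ofList faces) (fun x => x) false).length : Int) - 4) 1,
      PySem.List.pyGetD (PySem.List.sorted (PySem.Set.ofList faces) (fun x => x) false) i 0 + 1 = PySem.List.pyGetD (PySem.List.sorted (PySem.Set.ofList faces) (fun x => x) false) (i + 1) 0 ∧
      PySem.List.pyGetD (PySem.List.sorted (PySem.Set.ofList faces) (fun x => x) false) i 0 + 2 = PySem.List.pyGetD (PySem.List.sorted (PySem.Set.ofList faces) (fun x => x) false) (i + 2) 0 ∧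
      PySem.List.pyGetD (PySem.List.sorted (PySem.Set.ofList faces) (fun x => x) false) i 0 + 3 = PySem.List.pyGetD (PySem.List.sorted (PySem.Set.ofList faces) (fun x => x) false) (i + 3) 0 ∧
      PySem.List.pyGetD (PySem.List.sorted (PySem.Set.ofList faces) (fun x => x) false) i 0 + 4 = PySem.List.pyGetD (PySem.List.sorted (PySem.Set.ofList faces) (fun x => x) false) (i + 4) 0) ↔
    (∃ v ∈ (PySem.Set.ofList faces : List Int),
      (v + 1) ∈ (PySem.Set.ofList faces : List Int) ∧ (v + 2) ∈ (PySem.Set.ofList faces : List Int) ∧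
      (v + 3) ∈ (PySem.Set.ofList faces : List Int) ∧ (v + 4) ∈ (PySem.Set.ofList faces : List Int)) := by
  set l := PySem.List.sorted (PySem.Set.ofList faces) (fun x => x) false with hl
  have hperm : l.Perm (PySem.Set.ofList faces) := PySem.List.sorted_perm _ _ _
  have hmem : ∀ x : Int, x ∈ l ↔ x ∈ (PySem.Set.ofList faces : List Int) := fun x => hperm.mem_iff
  have hpw : l.Pairwise (· < ·) := PySem.List.sorted_ofList_pairwise_lt (xs := faces)
  constructor
  · rintro ⟨i, hi, h1, h2, h3, h4⟩
    rw [PySem.List.mem_pyRange_one] at hi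
    obtain ⟨hi0, hilt⟩ := hi
    have hb0 : i.toNat < l.length := by omega
    have hb1 : (i + 1).toNat < l.length := by omega
    have hb2 : (i + 2).toNat < l.length := by omega
    have hb3 : (i + 3).toNat < l.length := by omega
    have hb4 : (i + 4).toNat < l.length := by omega
    have g0 : PySem.List.pyGetD l i 0 = l[i.toNat]'hb0 :=
      PySem.List.pyGetD_eq_getElem l 0 hi0 (by omega)
    have g1 : PySem.List.pyGetD l (i + 1) 0 = l[(i + 1).toNat]'hb1 :=
      PySem.List.pyGetD_eq_getElem l 0 (by omega) (by omega)
    have g2 : PySem.List.pyGetD l (i + 2) 0 = l[(i + 2).toNat]'hb2 :=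
      PySem.List.pyGetD_eq_getElem l 0 (by omega) (by omega)
    have g3 : PySem.List.pyGetD l (i + 3) 0 = l[(i + 3).toNat]'hb3 :=
      PySem.List.pyGetD_eq_getElem l 0 (by omega) (by omega)
    have g4 : PySem.List.pyGetD l (i + 4) 0 = l[(i + 4).toNat]'hb4 :=
      PySem.List.pyGetD_eq_getElem l 0 (by omega) (by omega)
    rw [g0, g1] at h1
    rw [g0, g2] at h2
    rw [g0, g3] at h3
    rw [g0, g4] at h4
    refine ⟨l[i.toNat]'hb0, ?_, ?_, ?_, ?_, ?_⟩
    · rw [← hmem]; exact List.getElem_mem _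
    · rw [← hmem, h1]; exact List.getElem_mem _
    · rw [← hmem, h2]; exact List.getElem_mem _
    · rw [← hmem, h3]; exact List.getElem_mem _
    · rw [← hmem, h4]; exact List.getElem_mem _
  · rintro ⟨v, hv, h1, h2, h3, h4⟩
    rw [← hmem] at hv h1 h2 h3 h4
    obtain ⟨n0, hn0, e0⟩ := List.mem_iff_getElem.mp hv
    obtain ⟨n1, hn1, e1⟩ := List.mem_iff_getElem.mp h1
    obtain ⟨n2, hn2, e2⟩ := List.mem_iff_getElem.mp h2
    obtain ⟨n3, hn3, e3⟩ := List.mem_iff_getElem.mp h3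
    obtain ⟨n4, hn4, e4⟩ := List.mem_iff_getElem.mp h4
    have s1 : n1 = n0 + 1 := idx_succ l hpw n0 n1 hn0 hn1 (by rw [e1, e0])
    have s2 : n2 = n1 + 1 := idx_succ l hpw n1 n2 hn1 hn2 (by rw [e2, e1]; ring)
    have s3 : n3 = n2 + 1 := idx_succ l hpw n2 n3 hn2 hn3 (by rw [e3, e2]; ring)
    have s4 : n4 = n3 + 1 := idx_succ l hpw n3 n4 hn3 hn4 (by rw [e4, e3]; ring)
    have c0 : n0 < l.length := hn0
    have c1 : n0 + 1 < l.length := by omega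
    have c2 : n0 + 2 < l.length := by omega
    have c3 : n0 + 3 < l.length := by omega
    have c4 : n0 + 4 < l.length := by omega
    have E1 : l[n0 + 1]'c1 = v + 1 := (idxeq_int l (n0 + 1) n1 c1 hn1 (by omega)).trans e1
    have E2 : l[n0 + 2]'c2 = v + 2 := (idxeq_int l (n0 + 2) n2 c2 hn2 (by omega)).trans e2
    have E3 : l[n0 + 3]'c3 = v + 3 := (idxeq_int l (n0 + 3) n3 c3 hn3 (by omega)).trans e3
    have E4 : l[n0 + 4]'c4 = v + 4 := (idxeq_int l (n0 + 4) n4 c4 hn4 (by omega)).trans e4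
    have g0 : PySem.List.pyGetD l (n0 : Int) 0 = l[n0]'c0 := by
      rw [PySem.List.pyGetD_natCast]
      exact List.getD_eq_getElem l 0 c0
    have g1 : PySem.List.pyGetD l ((n0 : Int) + 1) 0 = l[n0 + 1]'c1 := by
      rw [show ((n0 : Int) + 1) = ((n0 + 1 : Nat) : Int) by push_cast; ring,
        PySem.List.pyGetD_natCast]
      exact List.getD_eq_getElem l 0 c1
    have g2 : PySem.List.pyGetD l ((n0 : Int) + 2) 0 = l[n0 + 2]'c2 := by
      rw [show ((n0 : Int) + 2) = ((n0 + 2 : Nat) : Int) by push_cast; ring,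
        PySem.List.pyGetD_natCast]
      exact List.getD_eq_getElem l 0 c2
    have g3 : PySem.List.pyGetD l ((n0 : Int) + 3) 0 = l[n0 + 3]'c3 := by
      rw [show ((n0 : Int) + 3) = ((n0 + 3 : Nat) : Int) by push_cast; ring,
        PySem.List.pyGetD_natCast]
      exact List.getD_eq_getElem l 0 c3
    have g4 : PySem.List.pyGetD l ((n0 : Int) + 4) 0 = l[n0 + 4]'c4 := by
      rw [show ((n0 : Int) + 4) = ((n0 + 4 : Nat) : Int) by push_cast; ring,
        PySem.List.pyGetD_natCast]
      exact List.getD_eq_getElem l 0 c4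
    refine ⟨(n0 : Int), ?_, ?_, ?_, ?_, ?_⟩
    · rw [PySem.List.mem_pyRange_one]
      constructor
      · omega
      · omega
    · rw [g0, g1, e0, E1]
    · rw [g0, g2, e0, E2]
    · rw [g0, g3, e0, E3]
    · rw [g0, g4, e0, E4]

-- ===== VERDICT (by name: the statement is the Claim_ definition above) =====
theorem calcula_pontos_sequencia_alta_spec : Claim_equal_calcula_pontos_sequencia_alta := by
  intro faces _
  unfold Spec_calcula_pontos_sequencia_alta calcula_pontos_sequencia_alta calcula_pontos_sequencia_alta_alt
  have h := window_iff faces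
  rcases pvLoopA_thirty_or_zero (PySem.List.sorted (PySem.Set.ofList faces) (fun x => x) false)
      (PySem.List.pyRange 0 (((PySem.List.sorted (PySem.Set.ofList faces) (fun x => x) false).length : Int) - 4) 1) with hA | hA <;>
  rcases pvLoopB_thirty_or_zero (PySem.Set.ofList faces) (PySem.Set.ofList faces) with hB | hB <;>
    simp only [] <;> rw [hA, hB]
  · exfalso
    have := (pvLoopB_eq_thirty_iff _ _).mpr (h.mp ((pvLoopA_eq_thirty_iff _ _).mp hA))
    omega
  · exfalso
    have := (pvLoopA_eq_thirty_iff _ _).mpr (h.mpr ((pvLoopB_eq_thirty_iff _ _).mp hB))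
    omega
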